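-- pv_equiv track=rewrite | github.com/7anan5anom/albleu | albleu.py | generate_stem_ngrams
-- ===== SOURCE A (Python) =====
-- def generate_stem_ngrams(words,n,stemdict):
--     length = len(words)
--     array = {}
--     #check for stem existence
--
--     for i in range(length-n+1):
--         templist = words[i:i+n]
--         ngram = []
--         for t in templist:
--             if t in stemdict.keys():
--                 if len(stemdict[t]) >0:
--                     ngram.append(stemdict[t][0])
--         if len(ngram)==n:
--             array[i] = " ".join(ngram)
--     return array
-- ===== SOURCE B (Python) =====
-- def generate_stem_ngrams(words, n, stemdict):
--     # One pass resolves each word's stem once; then each window is a slice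
--     # of the precomputed table instead of repeated dict lookups.
--     stems = [stemdict[w][0] if (w in stemdict and len(stemdict[w]) > 0) else None
--              for w in words]
--     array = {}
--     for i in range(len(words) - n + 1):
--         window = stems[i:i+n]
--         if len(window) == n and None not in window:
--             array[i] = " ".join(window)
--     return array
-- ===== Notes on version B (the rewrite author's own statement) =====
-- stated objective: alternative
-- what changed: B resolves each word's stem once into a precomputed table in a single pass, then each window is a plain slice of that table with a None-check, instead of A's per-window repeated dict membership tests and lookups.
import Mathlib
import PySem

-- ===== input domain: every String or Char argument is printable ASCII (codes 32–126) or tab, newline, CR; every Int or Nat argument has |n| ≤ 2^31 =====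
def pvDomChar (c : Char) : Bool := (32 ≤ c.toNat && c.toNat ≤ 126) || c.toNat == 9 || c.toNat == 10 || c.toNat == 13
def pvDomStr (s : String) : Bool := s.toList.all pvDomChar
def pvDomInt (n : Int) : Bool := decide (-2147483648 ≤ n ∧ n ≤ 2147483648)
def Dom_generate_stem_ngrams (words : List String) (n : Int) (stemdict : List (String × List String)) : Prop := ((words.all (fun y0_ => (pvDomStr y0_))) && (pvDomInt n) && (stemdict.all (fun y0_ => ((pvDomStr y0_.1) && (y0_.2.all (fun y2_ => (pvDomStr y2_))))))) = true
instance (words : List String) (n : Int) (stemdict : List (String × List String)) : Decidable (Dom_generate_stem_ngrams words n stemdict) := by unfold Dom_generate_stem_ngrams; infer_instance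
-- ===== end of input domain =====

-- B precomputes each word's stem once into a table, then scans windows as slices of that table (a different decomposition).

-- ===== PORT A =====
def generate_stem_ngrams (words : List String) (n : Int) (stemdict : List (String × List String)) : List (Int × String) :=
  let length : Int := (words.length : Int)
  let array : PySem.Dict Int String :=
    (PySem.List.pyRange 0 (length - n + 1) 1).foldl (fun array i =>
      let templist := PySem.List.slice words (some i) (some (i + n))
      let ngram := templist.foldl (fun ngram t =>
        match List.lookup t stemdict with
        | some (v :: _) => ngram ++ [v]     -- t in stemdict, len(stemdict[t])>0: append stemdict[t][0]
        | some [] => ngram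
        | none => ngram) ([] : List String)
      if (ngram.length : Int) = n then array.insert i (PySem.Str.join " " ngram) else array)
      PySem.Dict.empty
  array.items

-- ===== PORT B =====
def generate_stem_ngrams_alt (words : List String) (n : Int) (stemdict : List (String × List String)) : List (Int × String) :=
  let stems : List (Option String) := words.map (fun w =>
    match List.lookup w stemdict with
    | some (v :: _) => some v
    | _ => none)
  let array : PySem.Dict Int String :=
    (PySem.List.pyRange 0 ((words.length : Int) - n + 1) 1).foldl (fun array i =>
      let window := PySem.List.slice stems (some i) (some (i + n))
      if (window.length : Int) = n ∧ (none ∉ window) then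
        array.insert i (PySem.Str.join " " (window.filterMap id))
      else array)
      PySem.Dict.empty
  array.items

-- ===== PRECONDITION & SPEC =====
def Spec_generate_stem_ngrams (words : List String) (n : Int) (stemdict : List (String × List String)) (out : List (Int × String)) : Prop := out = generate_stem_ngrams_alt words n stemdict
instance (words : List String) (n : Int) (stemdict : List (String × List String)) (out : List (Int × String)) : Decidable (Spec_generate_stem_ngrams words n stemdict out) := by unfold Spec_generate_stem_ngrams; infer_instance

-- ===== CLAIM (what is proved, stated in full; the proofs are below) =====
def Claim_equal_generate_stem_ngrams : Prop := ∀ (words : List String) (n : Int) (stemdict : List (String × List String)), Dom_generate_stem_ngrams words n stemdict → Spec_generate_stem_ngrams words n stemdict (generate_stem_ngrams words n stemdict)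

-- ===== LEMMAS AND PROOFS =====

-- the per-word stem resolver B precomputes
def pvStemOf (stemdict : List (String × List String)) (w : String) : Option String :=
  match List.lookup w stemdict with
  | some (v :: _) => some v
  | _ => none

lemma pv_foldl_opt (stemdict : List (String × List String)) (l : List String) (acc : List String) :
    l.foldl (fun ngram t =>
      match List.lookup t stemdict with
      | some (v :: _) => ngram ++ [v]
      | some [] => ngram
      | none => ngram) acc = acc ++ l.filterMap (pvStemOf stemdict) := by
  induction l generalizing acc with
  | nil => simp
  | cons hd tl ih =>
    simp only [List.foldl_cons, List.filterMap_cons, pvStemOf]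
    cases h : List.lookup hd stemdict with
    | none => simp [ih, pvStemOf]
    | some vs => cases vs <;> simp [ih, pvStemOf]

lemma pv_slice_map {α β : Type} (f : α → β) (xs : List α) (a b : Int) :
    PySem.List.slice (xs.map f) (some a) (some b) = (PySem.List.slice xs (some a) (some b)).map f := by
  simp [PySem.List.slice, PySem.List.clampIdx, List.map_drop, List.map_take]

lemma pv_filterMap_id_len_eq {α : Type} (m : List (Option α)) :
    (m.filterMap id).length = m.length ↔ none ∉ m := by
  induction m with
  | nil => simp
  | cons hd tl ih =>
    cases hd with
    | none =>
      have hle := List.length_filterMap_le (fun x : Option α => x) tl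
      simp
      omega
    | some v => simpa using ih

-- ===== VERDICT (by name: the statement is the Claim_ definition above) =====
theorem generate_stem_ngrams_spec : Claim_equal_generate_stem_ngrams := by
  intro words n stemdict _
  unfold Spec_generate_stem_ngrams generate_stem_ngrams generate_stem_ngrams_alt
  simp only []
  congr 1
  apply PySem.List.foldl_congr_mem
  intro array i hi
  rw [PySem.List.mem_pyRange_one] at hi
  obtain ⟨h0, hlt⟩ := hi
  set f := fun w => pvStemOf stemdict w with hf
  have hstems : (words.map (fun w =>
      match List.lookup w stemdict with
      | some (v :: _) => some v
      | _ => none)) = words.map f := by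
    simp [hf, pvStemOf]
  rw [hstems, pv_slice_map, pv_foldl_opt]
  simp only [List.nil_append]
  set w := PySem.List.slice words (some i) (some (i + n)) with hw
  set m := w.map f with hm
  have hfm : m.filterMap id = w.filterMap (pvStemOf stemdict) := by
    rw [hm, List.filterMap_map]; rfl
  have hle : (w.filterMap (pvStemOf stemdict)).length ≤ m.length := by
    rw [← hfm]; exact List.length_filterMap_le id m
  have hml : m.length = w.length := by simp [hm]
  by_cases hn : 0 ≤ n
  · -- window has exactly n.toNat elements
    have hwl : w.length = n.toNat := by
      rw [hw, PySem.List.slice_toNat words h0 (by omega)]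
      have h1 : (i + n).toNat - i.toNat = n.toNat := by omega
      have h2 : i.toNat + n.toNat ≤ words.length := by omega
      simp [h1]
      omega
    by_cases hg : (none : Option String) ∉ m ∧ ((m.length : Int) = n)
    · have hlen : ((w.filterMap (pvStemOf stemdict)).length : Int) = n := by
        rw [← hfm]
        have := (pv_filterMap_id_len_eq m).2 hg.1
        rw [this]; exact hg.2
      rw [if_pos hlen, if_pos ⟨hg.2, hg.1⟩, hfm]
    · push Not at hg
      have hml' : (m.length : Int) = n := by rw [hml, hwl]; omega
      have hnone : (none : Option String) ∈ m := by
        by_cases hc : (none : Option String) ∈ m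
        · exact hc
        · exact absurd hml' (hg hc)
      have hlt' : (m.filterMap id).length < m.length := by
        have hne := (pv_filterMap_id_len_eq m).not.2 (by simp [hnone])
        have := List.length_filterMap_le id m
        omega
      have hAfalse : ¬ ((w.filterMap (pvStemOf stemdict)).length : Int) = n := by
        rw [← hfm]; omega
      rw [if_neg hAfalse, if_neg (by intro h; exact absurd hnone (by simpa using h.2))]
  · -- n < 0: both guards are false (a length is never negative)
    have hAfalse : ¬ ((w.filterMap (pvStemOf stemdict)).length : Int) = n := by omega
    have hBfalse : ¬ (((m.length : Int) = n) ∧ (none ∉ m)) := by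
      intro h; omega
    rw [if_neg hAfalse, if_neg hBfalse]
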